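-- pv_equiv track=rewrite | github.com/Samarth-Manch/doc-parser | dispatchers/agents/inter_panel_utils.py | _find_func_calls
-- ===== SOURCE A (Python) =====
-- from typing import Dict, List, Optional, Set, Tuple
--
-- def _find_matching_paren(expr: str, open_pos: int) -> int:
--     """Find the closing paren that matches the opening paren at open_pos."""
--     depth = 0
--     for i in range(open_pos, len(expr)):
--         if expr[i] == '(':
--             depth += 1
--         elif expr[i] == ')':
--             depth -= 1
--             if depth == 0:
--                 return i
--     return -1
--
-- def _find_func_calls(expr: str, func_name: str) -> List[Tuple[int, int, str]]:
--     """
--     Find all calls to func_name in expr, handling nested parentheses.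
--     Returns list of (start, end, full_match) for each call.
--     """
--     results = []
--     search_start = 0
--     while True:
--         # Find 'func(' but not 'otherfunc(' — check for word boundary
--         idx = expr.find(func_name + '(', search_start)
--         if idx == -1:
--             break
--         # Check it's not part of a longer function name (e.g., 'minvi' vs 'mvi')
--         if idx > 0 and expr[idx - 1].isalpha():
--             search_start = idx + 1
--             continue
--         paren_open = idx + len(func_name)
--         paren_close = _find_matching_paren(expr, paren_open)
--         if paren_close == -1:
--             break
--         full = expr[idx:paren_close + 1]
--         results.append((idx, paren_close + 1, full))
--         search_start = paren_close + 1
--     return results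
-- ===== SOURCE B (Python) =====
-- def _find_func_calls(expr, func_name):
--     """
--     Find all calls to func_name in expr, handling nested parentheses.
--     Returns list of (start, end, full_match) for each call.
--
--     Staged re-implementation: one stack pass pairs every '(' with its
--     matching ')', one pass lists every word-boundary-respecting candidate
--     start, then a single fold over the candidates selects the non-nested
--     ones via the pairing table (aborting at the first unmatched paren).
--     """
--     pat = func_name + '('
--     match = {}
--     stack = []
--     for i, ch in enumerate(expr):
--         if ch == '(':
--             stack.append(i)
--         elif ch == ')':
--             if stack:
--                 match[stack.pop()] = i
--     starts = [i for i in range(len(expr))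
--               if expr.startswith(pat, i)
--               and not (i > 0 and expr[i - 1].isalpha())]
--     results = []
--     cursor = 0
--     for p in starts:
--         if p < cursor:
--             continue
--         close = match.get(p + len(func_name))
--         if close is None:
--             break
--         results.append((p, close + 1, expr[p:close + 1]))
--         cursor = close + 1
--     return results
-- ===== Notes on version B (the rewrite author's own statement) =====
-- stated objective: alternative
-- what changed: B replaces A's while/str.find cursor loop with per-candidate forward paren scans by three staged passes: a stack pass building a table pairing each '(' with its matching ')', a pass listing all word-boundary-valid candidate starts, and one fold over that list that keeps non-nested candidates via table lookups and aborts at the first unmatched paren.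
import Mathlib
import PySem

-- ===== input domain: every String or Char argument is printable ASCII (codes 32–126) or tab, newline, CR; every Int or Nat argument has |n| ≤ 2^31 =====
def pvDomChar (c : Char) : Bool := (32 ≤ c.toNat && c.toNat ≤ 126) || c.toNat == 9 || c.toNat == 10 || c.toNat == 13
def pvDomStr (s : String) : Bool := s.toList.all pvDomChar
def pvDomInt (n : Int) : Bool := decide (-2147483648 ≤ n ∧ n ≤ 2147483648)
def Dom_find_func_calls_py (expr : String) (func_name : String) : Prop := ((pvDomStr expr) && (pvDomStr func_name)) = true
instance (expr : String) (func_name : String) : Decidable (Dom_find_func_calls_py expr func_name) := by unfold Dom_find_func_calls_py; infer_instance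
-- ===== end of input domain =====

-- B replaces A's cursor/find loop with per-candidate forward paren scans by three staged
-- passes (paren-matching table, candidate list, one selecting fold); objective: alternative.

-- ===== PORT A =====
-- _find_matching_paren's 'for i in range(open_pos, len(expr))' reading expr[i]:
-- a structural recursion over expr.drop open_pos carrying the running index i (exact).
def pvGoA : List Char → Nat → Int → Int
  | [], _, _ => -1
  | c :: rest, i, depth =>
    if c = '(' then pvGoA rest (i + 1) (depth + 1)
    else if c = ')' then
      if depth - 1 = 0 then (i : Int) else pvGoA rest (i + 1) (depth - 1)
    else pvGoA rest (i + 1) depth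

def find_matching_paren (expr : List Char) (openPos : Nat) : Int :=
  pvGoA (expr.drop openPos) openPos 0

-- the 'while True' sweep: search_start strictly increases and stays ≤ len(expr),
-- so fuel = len(expr) + 2 never runs out on the call below (exact).
def pvSweepA (cs : List Char) (pat : List Char) (fnLen : Nat) : Nat → Nat → List (Int × Int × String)
  | 0, _ => []
  | fuel + 1, ss =>
    let idx := PySem.Chars.findFrom cs pat (ss : Int) none
    if idx = -1 then []
    else if 0 < idx ∧ PySem.Chars.isalpha (PySem.List.pyGetD cs (idx - 1) ' ') = true then
      pvSweepA cs pat fnLen fuel (idx.toNat + 1)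
    else
      let pc := find_matching_paren cs (idx.toNat + fnLen)
      if pc = -1 then []
      else (idx, pc + 1, String.ofList (PySem.List.slice cs (some idx) (some (pc + 1)))) ::
           pvSweepA cs pat fnLen fuel (pc.toNat + 1)

def find_func_calls_py (expr : String) (func_name : String) : List (Int × Int × String) :=
  pvSweepA expr.toList (func_name.toList ++ ['(']) func_name.toList.length (expr.toList.length + 2) 0

-- ===== PORT B =====
-- 'for i, ch in enumerate(expr)' with a stack of open positions and the dict 'match':
-- structural recursion over the characters carrying (index, stack, dict) (exact).
def pvParenScan : List Char → Nat → List Nat → PySem.Dict Nat Nat → List Nat × PySem.Dict Nat Nat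
  | [], _, st, t => (st, t)
  | c :: rest, i, st, t =>
    if c = '(' then pvParenScan rest (i + 1) (i :: st) t
    else if c = ')' then
      match st with
      | [] => pvParenScan rest (i + 1) [] t
      | j :: st' => pvParenScan rest (i + 1) st' (t.insert j i)
    else pvParenScan rest (i + 1) st t

-- the candidate list comprehension: 'expr.startswith(pat, i)' with 0 ≤ i < len(expr)
-- is exactly 'pat is a prefix of expr[i:]' (exact).
def pvStarts (cs pat : List Char) : List Nat :=
  (List.range cs.length).filter (fun i =>
    PySem.Chars.startswith (cs.drop i) pat &&
    !(decide (0 < i) && PySem.Chars.isalpha (PySem.List.pyGetD cs ((i : Int) - 1) ' ')))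

-- the 'for p in starts' fold with its cursor; 'break' returns the results so far.
def pvCollect (cs : List Char) (fnLen : Nat) (tbl : PySem.Dict Nat Nat) :
    List Nat → Nat → List (Int × Int × String)
  | [], _ => []
  | p :: ps, cursor =>
    if p < cursor then pvCollect cs fnLen tbl ps cursor
    else
      match tbl.get? (p + fnLen) with
      | none => []
      | some c =>
          ((p : Int), (c : Int) + 1, String.ofList (PySem.List.slice cs (some (p : Int)) (some ((c : Int) + 1)))) ::
          pvCollect cs fnLen tbl ps (c + 1)

def find_func_calls_py_alt (expr : String) (func_name : String) : List (Int × Int × String) :=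
  let cs := expr.toList
  let pat := func_name.toList ++ ['(']
  pvCollect cs func_name.toList.length (pvParenScan cs 0 [] PySem.Dict.empty).2 (pvStarts cs pat) 0

-- ===== PRECONDITION & SPEC =====
def Spec_find_func_calls_py (expr : String) (func_name : String) (out : List (Int × Int × String)) : Prop := out = find_func_calls_py_alt expr func_name
instance (expr : String) (func_name : String) (out : List (Int × Int × String)) : Decidable (Spec_find_func_calls_py expr func_name out) := by unfold Spec_find_func_calls_py; infer_instance

-- ===== CLAIM (what is proved, stated in full; the proofs are below) =====
def Claim_equal_find_func_calls_py : Prop := ∀ (expr : String) (func_name : String), Dom_find_func_calls_py expr func_name → Spec_find_func_calls_py expr func_name (find_func_calls_py expr func_name)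

-- ===== LEMMAS AND PROOFS =====

-- the scan invariant: stack positions and table keys lie below the cursor,
-- the stack has no duplicates and is disjoint from the table's keys.
def pvInv (i : Nat) (st : List Nat) (t : PySem.Dict Nat Nat) : Prop :=
  (∀ q ∈ st, q < i) ∧ st.Nodup ∧ (∀ q ∈ t.keys, q < i) ∧ (∀ q ∈ st, q ∉ t.keys)

theorem pvParenScan_append (l1 l2 : List Char) (i : Nat) (st : List Nat) (t : PySem.Dict Nat Nat) :
    pvParenScan (l1 ++ l2) i st t =
      pvParenScan l2 (i + l1.length) (pvParenScan l1 i st t).1 (pvParenScan l1 i st t).2 := by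
  induction l1 generalizing i st t with
  | nil => simp [pvParenScan]
  | cons c rest ih =>
      have harith : i + 1 + rest.length = i + (rest.length + 1) := by omega
      cases st with
      | nil =>
          simp only [List.cons_append, pvParenScan, List.length_cons]
          split_ifs <;> rw [ih, harith]
      | cons j st' =>
          simp only [List.cons_append, pvParenScan, List.length_cons]
          split_ifs <;> rw [ih, harith]

theorem pvInv_preserved (l : List Char) (i : Nat) (st : List Nat) (t : PySem.Dict Nat Nat)
    (h : pvInv i st t) :
    pvInv (i + l.length) (pvParenScan l i st t).1 (pvParenScan l i st t).2 := by
  induction l generalizing i st t with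
  | nil => simpa [pvParenScan] using h
  | cons c rest ih =>
      obtain ⟨h1, h2, h3, h4⟩ := h
      simp only [pvParenScan, List.length_cons]
      have harith : i + 1 + rest.length = i + (rest.length + 1) := by ring
      split_ifs with hc1 hc2
      · rw [← harith]
        refine ih (i+1) (i :: st) t ⟨?_, ?_, ?_, ?_⟩
        · intro q hq; rcases List.mem_cons.1 hq with rfl | hq; · omega
          exact Nat.lt_succ_of_lt (h1 q hq)
        · exact List.nodup_cons.2 ⟨fun hmem => absurd (h1 i hmem) (lt_irrefl i), h2⟩
        · intro q hq; exact Nat.lt_succ_of_lt (h3 q hq)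
        · intro q hq; rcases List.mem_cons.1 hq with rfl | hq
          · intro hk; exact absurd (h3 q hk) (lt_irrefl q)
          · exact h4 q hq
      · cases st with
        | nil =>
            rw [← harith]
            refine ih (i+1) [] t ⟨by simp, List.nodup_nil, ?_, by simp⟩
            intro q hq; exact Nat.lt_succ_of_lt (h3 q hq)
        | cons j st' =>
            rw [← harith]
            refine ih (i+1) st' (t.insert j i) ⟨?_, ?_, ?_, ?_⟩
            · intro q hq; exact Nat.lt_succ_of_lt (h1 q (List.mem_cons_of_mem _ hq))
            · exact (List.nodup_cons.1 h2).2
            · intro q hq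
              rcases (PySem.Dict.mem_keys_insert t j q i).1 hq with rfl | hq
              · exact Nat.lt_succ_of_lt (h1 q (List.mem_cons_self))
              · exact Nat.lt_succ_of_lt (h3 q hq)
            · intro q hq hk
              rcases (PySem.Dict.mem_keys_insert t j q i).1 hk with rfl | hk
              · exact (List.nodup_cons.1 h2).1 hq
              · exact h4 q (List.mem_cons_of_mem _ hq) hk
      · rw [← harith]
        refine ih (i+1) st t ⟨fun q hq => Nat.lt_succ_of_lt (h1 q hq), h2,
          fun q hq => Nat.lt_succ_of_lt (h3 q hq), h4⟩

theorem pvScan_stable (l : List Char) (i : Nat) (st : List Nat) (t : PySem.Dict Nat Nat)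
    (p : Nat) (hp : p ∉ st) (hpi : p < i) :
    (pvParenScan l i st t).2.get? p = t.get? p := by
  induction l generalizing i st t with
  | nil => simp [pvParenScan]
  | cons c rest ih =>
      simp only [pvParenScan]
      split_ifs with hc1 hc2
      · refine ih (i+1) (i :: st) t ?_ (by omega)
        intro hmem; rcases List.mem_cons.1 hmem with rfl | hmem
        · omega
        · exact hp hmem
      · cases st with
        | nil => exact ih (i+1) [] t (by simp) (by omega)
        | cons j st' =>
            rw [ih (i+1) st' (t.insert j i)
              (fun hmem => hp (List.mem_cons_of_mem _ hmem)) (by omega)]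
            exact PySem.Dict.get?_insert_of_ne t _
              (fun hpj => hp (hpj ▸ List.mem_cons_self))
      · exact ih (i+1) st t hp (by omega)

theorem pvInv_push {i : Nat} {st : List Nat} {t : PySem.Dict Nat Nat} (h : pvInv i st t) :
    pvInv (i + 1) (i :: st) t := by
  obtain ⟨h1, h2, h3, h4⟩ := h
  refine ⟨?_, ?_, fun q hq => Nat.lt_succ_of_lt (h3 q hq), ?_⟩
  · intro q hq; rcases List.mem_cons.1 hq with rfl | hq
    · omega
    · exact Nat.lt_succ_of_lt (h1 q hq)
  · exact List.nodup_cons.2 ⟨fun hmem => absurd (h1 i hmem) (lt_irrefl i), h2⟩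
  · intro q hq; rcases List.mem_cons.1 hq with rfl | hq
    · intro hk; exact absurd (h3 q hk) (lt_irrefl q)
    · exact h4 q hq

theorem pvInv_pop {i : Nat} {j : Nat} {st' : List Nat} {t : PySem.Dict Nat Nat}
    (h : pvInv i (j :: st') t) : pvInv (i + 1) st' (t.insert j i) := by
  obtain ⟨h1, h2, h3, h4⟩ := h
  refine ⟨fun q hq => Nat.lt_succ_of_lt (h1 q (List.mem_cons_of_mem _ hq)),
    (List.nodup_cons.1 h2).2, ?_, ?_⟩
  · intro q hq
    rcases (PySem.Dict.mem_keys_insert t j q i).1 hq with rfl | hq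
    · exact Nat.lt_succ_of_lt (h1 q (List.mem_cons_self))
    · exact Nat.lt_succ_of_lt (h3 q hq)
  · intro q hq hk
    rcases (PySem.Dict.mem_keys_insert t j q i).1 hk with rfl | hk
    · exact (List.nodup_cons.1 h2).1 hq
    · exact h4 q (List.mem_cons_of_mem _ hq) hk

theorem pvInv_skip {i : Nat} {st : List Nat} {t : PySem.Dict Nat Nat} (h : pvInv i st t) :
    pvInv (i + 1) st t := by
  obtain ⟨h1, h2, h3, h4⟩ := h
  exact ⟨fun q hq => Nat.lt_succ_of_lt (h1 q hq), h2, fun q hq => Nat.lt_succ_of_lt (h3 q hq), h4⟩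

theorem pvScan_pop (l : List Char) (i : Nat) (st : List Nat) (t : PySem.Dict Nat Nat)
    (k : Nat) (hk : k < st.length) (h : pvInv i st t) :
    (pvParenScan l i st t).2.get? st[k] =
      if pvGoA l i ((k : Int) + 1) = -1 then t.get? st[k]
      else some (pvGoA l i ((k : Int) + 1)).toNat := by
  induction l generalizing i st t k with
  | nil => simp [pvParenScan, pvGoA]
  | cons c rest ih =>
      cases st with
      | nil => exact absurd hk (by simp)
      | cons j st' =>
          by_cases hc1 : c = '('
          · simp only [pvParenScan, pvGoA, if_pos hc1]
            have hcast : ((k : Int) + 1) + 1 = (((k + 1 : Nat) : Int) + 1) := by push_cast; ring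
            rw [hcast]
            have := ih (i + 1) (i :: j :: st') t (k + 1) (by simpa using hk) (pvInv_push h)
            simpa using this
          · by_cases hc2 : c = ')'
            · simp only [pvParenScan, pvGoA, if_neg hc1, if_pos hc2]
              cases k with
              | zero =>
                  rw [if_pos (by norm_num : ((0 : Nat) : Int) + 1 - 1 = 0),
                    if_neg (by omega : ¬((i : Nat) : Int) = -1)]
                  simp only [List.getElem_cons_zero]
                  rw [pvScan_stable rest (i + 1) st' (t.insert j i) j
                    (List.nodup_cons.1 h.2.1).1 (Nat.lt_succ_of_lt (h.1 j List.mem_cons_self))]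
                  simp [PySem.Dict.get?_insert_self]
              | succ m =>
                  rw [if_neg (by push_cast; omega : ¬((((m + 1 : Nat) : Int) + 1) - 1 = 0))]
                  have hcast : (((m + 1 : Nat) : Int) + 1) - 1 = ((m : Int) + 1) := by push_cast; ring
                  rw [hcast]
                  have := ih (i + 1) st' (t.insert j i) m (by simpa using hk) (pvInv_pop h)
                  simp only [List.getElem_cons_succ] at *
                  have hne : st'[m]'(by simpa using hk) ≠ j := by
                    intro hej
                    exact (List.nodup_cons.1 h.2.1).1 (hej ▸ List.getElem_mem _)
                  rw [this, PySem.Dict.get?_insert_of_ne t i hne]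
            · simp only [pvParenScan, pvGoA, if_neg hc1, if_neg hc2]
              exact ih (i + 1) (j :: st') t k hk (pvInv_skip h)

-- pvGoA's result, when not -1, is an index inside the scanned window.
theorem pvGoA_bounds (l : List Char) (i : Nat) (d : Int) :
    pvGoA l i d = -1 ∨ ((i : Int) ≤ pvGoA l i d ∧ pvGoA l i d < (i : Int) + l.length) := by
  induction l generalizing i d with
  | nil => exact Or.inl rfl
  | cons c rest ih =>
      simp only [pvGoA, List.length_cons]
      split_ifs with hc1 hc2 hd
      · rcases ih (i+1) (d+1) with h | ⟨h1, h2⟩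
        · exact Or.inl h
        · right; constructor <;> [skip; skip] <;> push_cast at * <;> omega
      · right; push_cast; omega
      · rcases ih (i+1) (d-1) with h | ⟨h1, h2⟩
        · exact Or.inl h
        · right; constructor <;> [skip; skip] <;> push_cast at * <;> omega
      · rcases ih (i+1) d with h | ⟨h1, h2⟩
        · exact Or.inl h
        · right; constructor <;> [skip; skip] <;> push_cast at * <;> omega

-- the table agrees with A's forward scan at every '(' position.
theorem pvTable_correct (pre suf : List Char) :
    (pvParenScan (pre ++ '(' :: suf) 0 [] PySem.Dict.empty).2.get? pre.length =
      if find_matching_paren (pre ++ '(' :: suf) pre.length = -1 then none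
      else some (find_matching_paren (pre ++ '(' :: suf) pre.length).toNat := by
  have hfm : find_matching_paren (pre ++ '(' :: suf) pre.length = pvGoA suf (pre.length + 1) 1 := by
    unfold find_matching_paren
    rw [List.drop_left]
    simp [pvGoA]
  have hinv0 : pvInv 0 [] PySem.Dict.empty :=
    ⟨by simp, List.nodup_nil, by simp [PySem.Dict.keys_empty], by simp⟩
  have hinv1 := pvInv_preserved pre 0 [] PySem.Dict.empty hinv0
  rw [pvParenScan_append pre ('(' :: suf) 0 [] PySem.Dict.empty]
  simp only [Nat.zero_add] at hinv1 ⊢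
  set st1 := (pvParenScan pre 0 [] PySem.Dict.empty).1
  set t1 := (pvParenScan pre 0 [] PySem.Dict.empty).2
  have hstep : pvParenScan ('(' :: suf) pre.length st1 t1 =
      pvParenScan suf (pre.length + 1) (pre.length :: st1) t1 := by
    simp [pvParenScan]
  rw [hstep]
  have hpop := pvScan_pop suf (pre.length + 1) (pre.length :: st1) t1 0 (by simp)
    (pvInv_push hinv1)
  simp only [List.getElem_cons_zero, Nat.cast_zero, zero_add] at hpop
  rw [hpop, hfm]
  have ht1 : t1.get? pre.length = none :=
    (PySem.Dict.get?_eq_none_iff_not_mem_keys t1 pre.length).2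
      (fun hmem => absurd (hinv1.2.2.1 pre.length hmem) (lt_irrefl _))
  rw [ht1]

-- membership in the candidate list.
theorem pvStarts_mem (cs pat : List Char) (p : Nat) :
    p ∈ pvStarts cs pat ↔
      p < cs.length ∧ pat <+: cs.drop p ∧
      ¬(0 < p ∧ PySem.Chars.isalpha (PySem.List.pyGetD cs ((p : Int) - 1) ' ') = true) := by
  unfold pvStarts
  rw [List.mem_filter, List.mem_range]
  constructor
  · rintro ⟨h1, h2⟩
    simp only [Bool.and_eq_true, Bool.not_eq_true', Bool.and_eq_false_iff,
      decide_eq_false_iff_not, PySem.Chars.startswith_iff] at h2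
    refine ⟨h1, h2.1, ?_⟩
    rintro ⟨ha, hb⟩
    rcases h2.2 with h | h
    · exact h ha
    · rw [hb] at h; simp at h
  · rintro ⟨h1, h2, h3⟩
    refine ⟨h1, ?_⟩
    simp only [Bool.and_eq_true, Bool.not_eq_true', Bool.and_eq_false_iff,
      decide_eq_false_iff_not, PySem.Chars.startswith_iff]
    refine ⟨h2, ?_⟩
    by_cases hp : 0 < p
    · right
      cases hbc : PySem.Chars.isalpha (PySem.List.pyGetD cs ((p : Int) - 1) ' ') with
      | false => rfl
      | true => exact absurd ⟨hp, hbc⟩ h3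
    · exact Or.inl hp

-- the candidate list is strictly increasing.
theorem pvStarts_sorted (cs pat : List Char) : (pvStarts cs pat).Pairwise (· < ·) :=
  (List.pairwise_lt_range).sublist List.filter_sublist

-- pvCollect ignores a cursor move across a gap free of candidates.
theorem pvCollect_cursor (cs : List Char) (fnLen : Nat) (tbl : PySem.Dict Nat Nat)
    (l : List Nat) (c c' : Nat) (hcc : c ≤ c')
    (hgap : ∀ p ∈ l, c ≤ p → c' ≤ p) :
    pvCollect cs fnLen tbl l c = pvCollect cs fnLen tbl l c' := by
  induction l generalizing c c' with
  | nil => rfl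
  | cons p ps ih =>
      simp only [pvCollect]
      by_cases hpc : p < c
      · rw [if_pos hpc, if_pos (by omega), ih c c' hcc
          (fun q hq h => hgap q (List.mem_cons_of_mem _ hq) h)]
      · have hc' : c' ≤ p := hgap p List.mem_cons_self (by omega)
        rw [if_neg hpc, if_neg (by omega)]

theorem pvCollect_cons_lt (cs : List Char) (fnLen : Nat) (tbl : PySem.Dict Nat Nat)
    (p : Nat) (ps : List Nat) (cursor : Nat) (h : p < cursor) :
    pvCollect cs fnLen tbl (p :: ps) cursor = pvCollect cs fnLen tbl ps cursor := by
  rw [pvCollect.eq_def]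
  simp [h]

-- peeling the fold at its first admitted candidate.
theorem pvCollect_peel (cs : List Char) (fnLen : Nat) (tbl : PySem.Dict Nat Nat)
    (l : List Nat) (hs : l.Pairwise (· < ·)) (ss p : Nat)
    (hmem : p ∈ l) (hmin : ∀ q ∈ l, ss ≤ q → p ≤ q) (hp : ss ≤ p)
    (htbl : ∀ c, tbl.get? (p + fnLen) = some c → p ≤ c) :
    pvCollect cs fnLen tbl l ss =
      match tbl.get? (p + fnLen) with
      | none => []
      | some c =>
          ((p : Int), (c : Int) + 1, String.ofList (PySem.List.slice cs (some (p : Int)) (some ((c : Int) + 1)))) ::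
          pvCollect cs fnLen tbl l (c + 1) := by
  induction l with
  | nil => exact absurd hmem (List.not_mem_nil)
  | cons q qs ih =>
      rcases List.mem_cons.1 hmem with rfl | hmem'
      · rw [show pvCollect cs fnLen tbl (p :: qs) ss =
            if p < ss then pvCollect cs fnLen tbl qs ss else
              match tbl.get? (p + fnLen) with
              | none => []
              | some c => ((p : Int), (c : Int) + 1, String.ofList (PySem.List.slice cs (some (p : Int)) (some ((c : Int) + 1)))) ::
                  pvCollect cs fnLen tbl qs (c + 1) from rfl,
          if_neg (by omega : ¬ p < ss)]
        cases htb : tbl.get? (p + fnLen) with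
        | none => rfl
        | some c =>
            have hqc : p < c + 1 := by have := htbl c htb; omega
            simp only
            congr 1
            rw [pvCollect_cons_lt _ _ _ _ _ _ hqc]
      · have hqp : q < p := (List.pairwise_cons.1 hs).1 p hmem'
        have hqss : q < ss := by
          by_contra hge
          have := hmin q List.mem_cons_self (by omega)
          omega
        simp only [pvCollect, if_pos hqss]
        rw [ih (List.pairwise_cons.1 hs).2 hmem'
          (fun r hr h => hmin r (List.mem_cons_of_mem _ hr) h)]
        cases htb : tbl.get? (p + fnLen) with
        | none => rfl
        | some c =>
            have hqc : q < c + 1 := by have := htbl c htb; omega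
            simp only
            congr 1
            rw [if_pos hqc]

-- the fold returns nothing when every candidate lies below the cursor.
theorem pvCollect_all_lt (cs : List Char) (fnLen : Nat) (tbl : PySem.Dict Nat Nat)
    (l : List Nat) (c : Nat) (h : ∀ p ∈ l, p < c) :
    pvCollect cs fnLen tbl l c = [] := by
  induction l with
  | nil => rfl
  | cons p ps ih =>
      rw [pvCollect_cons_lt _ _ _ _ _ _ (h p List.mem_cons_self)]
      exact ih (fun q hq => h q (List.mem_cons_of_mem _ hq))

-- an occurrence at p ≥ ss makes the pattern an infix of the suffix at ss.
theorem pvInfix_of_occ (cs pat : List Char) (ss p : Nat) (hsp : ss ≤ p)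
    (hpre : pat <+: cs.drop p) : pat <:+: cs.drop ss := by
  have hdd : cs.drop p = (cs.drop ss).drop (p - ss) := by
    rw [List.drop_drop]
    congr 1
    omega
  rw [hdd] at hpre
  exact hpre.isInfix.trans (List.drop_suffix _ _).isInfix

-- A's cursor sweep equals B's fold over the precomputed candidate list.
theorem pvSweep_eq_collect (cs fn : List Char) (fuel ss : Nat)
    (hss : ss ≤ cs.length) (hfuel : cs.length + 1 ≤ fuel + ss) :
    pvSweepA cs (fn ++ ['(']) fn.length fuel ss =
      pvCollect cs fn.length (pvParenScan cs 0 [] PySem.Dict.empty).2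
        (pvStarts cs (fn ++ ['('])) ss := by
  induction fuel generalizing ss with
  | zero => omega
  | succ fuel ih =>
      simp only [pvSweepA]
      set pat := fn ++ ['('] with hpat
      set tbl := (pvParenScan cs 0 [] PySem.Dict.empty).2 with htbldef
      set idx := PySem.Chars.findFrom cs pat (ss : Int) none with hidxdef
      by_cases hidx : idx = -1
      · rw [if_pos hidx]
        symm
        refine pvCollect_all_lt _ _ _ _ _ ?_
        intro p hp
        obtain ⟨hplt, hppre, -⟩ := (pvStarts_mem cs pat p).1 hp
        by_contra hge
        exact ((PySem.Chars.findFrom_natCast_eq_neg_one_iff cs pat ss hss).1 hidx)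
          (pvInfix_of_occ cs pat ss p (by omega) hppre)
      · obtain ⟨hge, hpref, hminno⟩ := PySem.Chars.findFrom_natCast_spec cs pat ss hss hidx
        have hidx0 : (0 : Int) ≤ idx := le_trans (by omega) hge
        have hidxcast : ((idx.toNat : Nat) : Int) = idx := Int.toNat_of_nonneg hidx0
        have hgeN : ss ≤ idx.toNat := by omega
        obtain ⟨rest, hrest⟩ := id hpref
        have hlt : idx.toNat < cs.length := by
          have hlen : pat.length ≤ (cs.drop idx.toNat).length := hpref.length_le
          simp only [hpat, List.length_append, List.length_cons, List.length_nil,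
            List.length_drop] at hlen
          omega
        have hmin : ∀ q ∈ pvStarts cs pat, ss ≤ q → idx.toNat ≤ q := by
          intro q hq hsq
          by_contra hlt'
          obtain ⟨-, hqpre, -⟩ := (pvStarts_mem cs pat q).1 hq
          exact hminno q hsq (by omega) hqpre
        by_cases hskip : 0 < idx ∧ PySem.Chars.isalpha (PySem.List.pyGetD cs (idx - 1) ' ') = true
        · rw [if_neg hidx, if_pos hskip]
          rw [ih (idx.toNat + 1) (by omega) (by omega)]
          symm
          refine pvCollect_cursor _ _ _ _ ss (idx.toNat + 1) (by omega) ?_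
          intro q hq hsq
          rcases Nat.lt_or_ge q (idx.toNat + 1) with hc | hc
          · exfalso
            have hqi : q = idx.toNat := by
              have := hmin q hq hsq
              omega
            obtain ⟨-, -, hbound⟩ := (pvStarts_mem cs pat q).1 hq
            refine hbound ?_
            subst hqi
            rw [hidxcast]
            exact ⟨by omega, hskip.2⟩
          · exact hc
        · rw [if_neg hidx, if_neg hskip]
          -- idx.toNat is an admitted candidate
          have hmem : idx.toNat ∈ pvStarts cs pat := by
            refine (pvStarts_mem cs pat idx.toNat).2 ⟨hlt, hpref, ?_⟩
            rintro ⟨ha, hb⟩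
            refine hskip ⟨by omega, ?_⟩
            rw [← hidxcast] at hb ⊢
            exact hb
          -- the table agrees with A's forward scan at the candidate's '('
          have hcs : cs = (cs.take idx.toNat ++ fn) ++ '(' :: rest := by
            conv_lhs => rw [← List.take_append_drop idx.toNat cs]
            rw [← hrest, hpat]
            simp
          have hprelen : (cs.take idx.toNat ++ fn).length = idx.toNat + fn.length := by
            simp [List.length_take]
            omega
          have htab := pvTable_correct (cs.take idx.toNat ++ fn) rest
          rw [hprelen, ← hcs] at htab
          set pc := find_matching_paren cs (idx.toNat + fn.length) with hpcdef
          by_cases hpc : pc = -1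
          · rw [if_pos hpc]
            rw [if_pos hpc] at htab
            rw [pvCollect_peel cs fn.length tbl (pvStarts cs pat) (pvStarts_sorted cs pat)
              ss idx.toNat hmem hmin hgeN (by rw [htab]; intro c hc; cases hc)]
            rw [htab]
          · rw [if_neg hpc]
            rw [if_neg hpc] at htab
            have hpcB : (idx.toNat + fn.length : Int) ≤ pc ∧ pc < (idx.toNat + fn.length : Int) + (cs.drop (idx.toNat + fn.length)).length := by
              rcases pvGoA_bounds (cs.drop (idx.toNat + fn.length)) (idx.toNat + fn.length) 0 with h | h
              · exact absurd h hpc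
              · exact_mod_cast h
            have hpc0 : (0 : Int) ≤ pc := le_trans (by positivity) hpcB.1
            have hpccast : ((pc.toNat : Nat) : Int) = pc := Int.toNat_of_nonneg hpc0
            have hpclt : pc.toNat < cs.length := by
              have := hpcB.2
              rw [List.length_drop] at this
              omega
            have hpcge : idx.toNat + fn.length ≤ pc.toNat := by
              have := hpcB.1
              omega
            rw [pvCollect_peel cs fn.length tbl (pvStarts cs pat) (pvStarts_sorted cs pat)
              ss idx.toNat hmem hmin hgeN
              (by rw [htab]; intro c hc; cases hc; omega)]
            rw [htab]
            simp only
            rw [hidxcast, hpccast]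
            congr 1
            exact ih (pc.toNat + 1) (by omega) (by omega)

-- ===== VERDICT (by name: the statement is the Claim_ definition above) =====
theorem find_func_calls_py_spec : Claim_equal_find_func_calls_py := by
  intro expr func_name _
  unfold Spec_find_func_calls_py find_func_calls_py find_func_calls_py_alt
  exact pvSweep_eq_collect expr.toList func_name.toList (expr.toList.length + 2) 0
    (Nat.zero_le _) (by omega)
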